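-- pv_equiv track=rewrite | github.com/GiantMango/SlothBytesChallenges | valid_comment.py | comments_correct
-- ===== SOURCE A (Python) =====
-- def comments_correct(s: str) -> bool:
--     if len(s) % 2 != 0 or len(s) < 2:
--         return False
--
--     is_multi_comment = False
--     for i in range(0, len(s), 2):
--         c = s[i] + s[i + 1]
--         if c not in ["//", "/*", "*/"]:
--             return False
--
--         if is_multi_comment and c == "/*":
--             return False
--         elif not is_multi_comment and c == "/*":
--             is_multi_comment = True
--         elif is_multi_comment and c == "*/":
--             is_multi_comment = False
--         elif not is_multi_comment and c == "*/":
--             return False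
--
--     if is_multi_comment:
--         return False
--
--     return True
-- ===== SOURCE B (Python) =====
-- def comments_correct(s: str) -> bool:
--     if len(s) < 2 or len(s) % 2 != 0:
--         return False
--     chunks = [s[i:i + 2] for i in range(0, len(s), 2)]
--     if any(c not in ("//", "/*", "*/") for c in chunks):
--         return False
--     # line-comment tokens are irrelevant; the block delimiters must strictly
--     # alternate open, close, open, close ... and pair up completely
--     delims = [c for c in chunks if c != "//"]
--     return len(delims) % 2 == 0 and all(
--         c == ("/*" if i % 2 == 0 else "*/") for i, c in enumerate(delims))
-- ===== Notes on version B (the rewrite author's own statement) =====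
-- stated objective: alternative
-- what changed: Replaced the stateful in-block-flag loop by a pass pipeline: split the string into two-character chunks, check every chunk is a valid token, then filter out the line-comment chunks and check the remaining block delimiters strictly alternate open/close and pair up completely.
import Mathlib
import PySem

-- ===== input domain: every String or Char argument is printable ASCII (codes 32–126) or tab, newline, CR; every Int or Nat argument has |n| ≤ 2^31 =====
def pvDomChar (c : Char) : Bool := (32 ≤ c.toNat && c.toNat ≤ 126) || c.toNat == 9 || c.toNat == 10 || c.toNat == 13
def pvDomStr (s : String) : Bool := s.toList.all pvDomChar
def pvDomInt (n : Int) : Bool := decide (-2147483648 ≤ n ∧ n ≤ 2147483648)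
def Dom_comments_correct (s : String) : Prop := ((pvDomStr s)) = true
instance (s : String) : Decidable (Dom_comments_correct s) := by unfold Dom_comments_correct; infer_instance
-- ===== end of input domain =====

-- B replaces A's stateful token loop by a chunk/filter pass: split into 2-char chunks,
-- check all are tokens, then check the non-"//" delimiters strictly alternate /* , */ and pair up.

-- ===== PORT A =====
-- the 'for i in range(0, len(s), 2)' loop, recursing on the range list, carrying is_multi_comment
def pvALoop (cs : List Char) : List Int → Bool → Bool
  | [], m => if m then false else true
  | i :: rest, m =>
    match PySem.List.pyGet? cs i, PySem.List.pyGet? cs (i + 1) with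
    | some a, some b =>
      let c : List Char := [a, b]    -- c = s[i] + s[i+1]
      if ¬ (c = ['/', '/'] ∨ c = ['/', '*'] ∨ c = ['*', '/']) then false
      else if m = true ∧ c = ['/', '*'] then false
      else if ¬ m = true ∧ c = ['/', '*'] then pvALoop cs rest true
      else if m = true ∧ c = ['*', '/'] then pvALoop cs rest false
      else if ¬ m = true ∧ c = ['*', '/'] then false
      else pvALoop cs rest m
    | _, _ => false    -- IndexError (unreachable here: even length and i ≤ len - 2)

def comments_correct (s : String) : Bool :=
  if PySem.Int.mod (PySem.Str.len s) 2 ≠ 0 ∨ PySem.Str.len s < 2 then false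
  else pvALoop s.toList (PySem.List.pyRange 0 (PySem.Str.len s) 2) false

-- ===== PORT B =====
def comments_correct_alt (s : String) : Bool :=
  let cs := s.toList
  let n := PySem.Str.len s
  if n < 2 ∨ PySem.Int.mod n 2 ≠ 0 then false
  else
    let chunks := (PySem.List.pyRange 0 n 2).map (fun i => PySem.List.slice cs (some i) (some (i + 2)))
    if chunks.any (fun c => !(decide (c = ['/', '/']) || decide (c = ['/', '*']) || decide (c = ['*', '/']))) then false
    else
      let delims := chunks.filter (fun c => !decide (c = ['/', '/']))
      decide (delims.length % 2 = 0) &&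
        (PySem.List.enumerate delims 0).all
          (fun p => decide (p.2 = (if PySem.Int.mod p.1 2 = 0 then ['/', '*'] else ['*', '/'])))

-- ===== PRECONDITION & SPEC =====
def Spec_comments_correct (s : String) (out : Bool) : Prop := out = comments_correct_alt s
instance (s : String) (out : Bool) : Decidable (Spec_comments_correct s out) := by unfold Spec_comments_correct; infer_instance

-- ===== CLAIM (what is proved, stated in full; the proofs are below) =====
def Claim_equal_comments_correct : Prop := ∀ (s : String), Dom_comments_correct s → Spec_comments_correct s (comments_correct s)

-- ===== LEMMAS AND PROOFS =====

-- proof-only two-state grammar parser, the bridge between A's loop and B's chunk pass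
mutual
def pvSeq : List Char → Bool
  | [] => true
  | a :: b :: rest =>
    if a = '/' ∧ b = '/' then pvSeq rest
    else if a = '/' ∧ b = '*' then pvBlock rest
    else false
  | _ => false

def pvBlock : List Char → Bool
  | a :: b :: rest =>
    if a = '/' ∧ b = '/' then pvBlock rest
    else if a = '*' ∧ b = '/' then pvSeq rest
    else false
  | _ => false
end

-- dropping two leading characters shifts a (nonnegative) index by 2
theorem pvGetShift (a b : Char) (rest : List Char) (i : Int) (hi : 0 ≤ i) :
    PySem.List.pyGet? (a :: b :: rest) (i + 2) = PySem.List.pyGet? rest i := by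
  simp only [PySem.List.pyGet?, PySem.List.pyIdx?, List.length_cons]
  by_cases hlt : i < (rest.length : Int)
  · rw [if_pos (by omega), if_pos (by push_cast; omega), if_pos hi, if_pos hlt]
    have ht : (i + 2).toNat = i.toNat + 2 := by omega
    simp [ht]
  · rw [if_pos (by omega), if_neg (by push_cast; omega), if_pos hi, if_neg hlt]
    rfl

theorem pvGet0 (a b : Char) (rest : List Char) :
    PySem.List.pyGet? (a :: b :: rest) 0 = some a := by
  simp only [PySem.List.pyGet?, PySem.List.pyIdx?, List.length_cons]
  rw [if_pos (by omega), if_pos (by push_cast; omega)]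
  rfl

theorem pvGet1 (a b : Char) (rest : List Char) :
    PySem.List.pyGet? (a :: b :: rest) (0 + 1) = some b := by
  simp only [PySem.List.pyGet?, PySem.List.pyIdx?, List.length_cons]
  rw [if_pos (by omega), if_pos (by push_cast; omega)]
  rfl

theorem pvALoop_shift (ys : List Int) (hys : ∀ j ∈ ys, 0 ≤ j) (a b : Char) (rest : List Char) (m : Bool) :
    pvALoop (a :: b :: rest) (ys.map (· + 2)) m = pvALoop rest ys m := by
  induction ys generalizing m with
  | nil => rfl
  | cons j ys ih =>
    have hj : 0 ≤ j := hys j (by simp)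
    have h1 : PySem.List.pyGet? (a :: b :: rest) (j + 2) = PySem.List.pyGet? rest j :=
      pvGetShift a b rest j hj
    have h1' : PySem.List.pyGet? (a :: b :: rest) (j + 2 + 1) = PySem.List.pyGet? rest (j + 1) := by
      have := pvGetShift a b rest (j + 1) (by omega)
      calc PySem.List.pyGet? (a :: b :: rest) (j + 2 + 1)
          = PySem.List.pyGet? (a :: b :: rest) (j + 1 + 2) := by ring_nf
        _ = PySem.List.pyGet? rest (j + 1) := this
    have ihr : ∀ m', pvALoop (a :: b :: rest) (ys.map (· + 2)) m' = pvALoop rest ys m' :=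
      fun m' => ih (fun x hx => hys x (by simp [hx])) m'
    simp only [List.map_cons, pvALoop, h1, h1']
    cases PySem.List.pyGet? rest j with
    | none => rfl
    | some x =>
      cases PySem.List.pyGet? rest (j + 1) with
      | none => rfl
      | some y =>
        dsimp only
        split_ifs <;> first | rfl | exact ihr _

theorem pvRange2_nonneg (n : Int) : ∀ j ∈ PySem.List.pyRange 0 n 2, 0 ≤ j := by
  intro j hj
  rw [PySem.List.pyRange_of_pos 0 n (by norm_num)] at hj
  simp at hj
  obtain ⟨k, _, hk⟩ := hj
  omega

theorem pvRange2_cons (n : Int) (hn : 2 ≤ n) :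
    PySem.List.pyRange 0 n 2 = 0 :: (PySem.List.pyRange 0 (n - 2) 2).map (· + 2) := by
  rw [PySem.List.pyRange_of_pos 0 n (by norm_num),
      PySem.List.pyRange_of_pos 0 (n - 2) (by norm_num)]
  have hcount : (if (0:Int) < n then ((n - 0 + 2 - 1) / 2).toNat else 0)
      = (if (0:Int) < n - 2 then ((n - 2 - 0 + 2 - 1) / 2).toNat else 0) + 1 := by
    split_ifs <;> omega
  rw [hcount, List.range_succ_eq_map]
  simp only [List.map_cons, List.map_map]
  norm_num
  intro k _
  ring

theorem pvRange2_nil : PySem.List.pyRange 0 0 2 = [] := by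
  rw [PySem.List.pyRange_of_pos 0 0 (by norm_num)]
  norm_num

-- invariant: A's loop over an even-length list equals the parser in the matching state
theorem pvLoop_eq_parser : ∀ (cs : List Char), cs.length % 2 = 0 → ∀ (m : Bool),
    pvALoop cs (PySem.List.pyRange 0 (cs.length : Int) 2) m
      = (if m then pvBlock cs else pvSeq cs)
  | [], _, m => by
    cases m <;> rfl
  | [a], h, m => by simp at h
  | a :: b :: rest, h, m => by
    have hrest : rest.length % 2 = 0 := by simp at h; omega
    have hlen : ((a :: b :: rest).length : Int) = (rest.length : Int) + 2 := by
      push_cast [List.length_cons]; ring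
    rw [hlen, pvRange2_cons _ (by have := Int.natCast_nonneg rest.length; omega)]
    have hsub : ((rest.length : Int) + 2 - 2) = (rest.length : Int) := by ring
    rw [hsub]
    have hshift : ∀ m', pvALoop (a :: b :: rest) ((PySem.List.pyRange 0 (rest.length : Int) 2).map (· + 2)) m'
        = pvALoop rest (PySem.List.pyRange 0 (rest.length : Int) 2) m' :=
      fun m' => pvALoop_shift _ (pvRange2_nonneg _) a b rest m'
    have ih : ∀ m', pvALoop rest (PySem.List.pyRange 0 (rest.length : Int) 2) m'
        = (if m' then pvBlock rest else pvSeq rest) := pvLoop_eq_parser rest hrest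
    simp only [pvALoop, pvGet0, pvGet1]
    simp only [hshift, ih]
    cases m <;> simp only [pvSeq, pvBlock] <;> split_ifs <;> simp_all

-- ===== B-side helpers for the proof =====

def pvChunks (cs : List Char) : List (List Char) :=
  (PySem.List.pyRange 0 (cs.length : Int) 2).map (fun i => PySem.List.slice cs (some i) (some (i + 2)))

def pvH : Bool → List (List Char) → Bool
  | _, [] => true
  | e, x :: l => decide (x = (if e then ['/', '*'] else ['*', '/'])) && pvH (!e) l

def pvBodyL (L : List (List Char)) (p : Nat) (e : Bool) : Bool :=
  if L.any (fun c => !(decide (c = ['/', '/']) || decide (c = ['/', '*']) || decide (c = ['*', '/']))) then false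
  else decide ((L.filter (fun c => !decide (c = ['/', '/']))).length % 2 = p) &&
    pvH e (L.filter (fun c => !decide (c = ['/', '/'])))

theorem pvSliceHead (a b : Char) (rest : List Char) :
    PySem.List.slice (a :: b :: rest) (some 0) (some 2) = [a, b] := by
  simp [PySem.List.slice, PySem.List.clampIdx]

theorem pvSliceShift (a b : Char) (rest : List Char) (j : Int) (hj : 0 ≤ j) :
    PySem.List.slice (a :: b :: rest) (some (j + 2)) (some (j + 2 + 2)) = PySem.List.slice rest (some j) (some (j + 2)) := by
  simp only [PySem.List.slice, PySem.List.clampIdx, List.length_cons]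
  rw [if_neg (by omega), if_neg (by omega), if_neg (by omega), if_neg (by omega)]
  have h2 : (j + 2).toNat = j.toNat + 2 := by omega
  have hmin : min (j + 2).toNat (rest.length + 1 + 1) = min j.toNat rest.length + 2 := by omega
  have hmin2 : min (j + 2 + 2).toNat (rest.length + 1 + 1) = min (j + 2).toNat rest.length + 2 := by omega
  rw [hmin, hmin2]
  simp

theorem pvChunks_nil : pvChunks [] = [] := by
  simp [pvChunks, pvRange2_nil]

theorem pvChunks_cons (a b : Char) (rest : List Char) :
    pvChunks (a :: b :: rest) = [a, b] :: pvChunks rest := by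
  unfold pvChunks
  have hlen : ((a :: b :: rest).length : Int) = (rest.length : Int) + 2 := by
    push_cast [List.length_cons]; ring
  rw [hlen, pvRange2_cons _ (by have := Int.natCast_nonneg rest.length; omega)]
  have hsub : ((rest.length : Int) + 2 - 2) = (rest.length : Int) := by ring
  rw [hsub]
  simp only [List.map_cons, List.map_map]
  have hhd : PySem.List.slice (a :: b :: rest) (some 0) (some (0 + 2)) = [a, b] := by
    simpa using pvSliceHead a b rest
  rw [hhd]
  congr 1
  apply List.map_congr_left
  intro j hj
  have hj0 : 0 ≤ j := pvRange2_nonneg _ j hj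
  simpa using pvSliceShift a b rest j hj0

-- the enumerate alternation check is pvH with the phase read off the start parity
theorem pvEnumAll : ∀ (l : List (List Char)) (k : Int), 0 ≤ k →
    (PySem.List.enumerate l k).all
        (fun p => decide (p.2 = (if PySem.Int.mod p.1 2 = 0 then ['/', '*'] else ['*', '/'])))
      = pvH (decide (PySem.Int.mod k 2 = 0)) l := by
  intro l
  induction l with
  | nil => intro k _; rfl
  | cons x l ih =>
    intro k hk
    rw [PySem.List.enumerate_cons, List.all_cons, ih (k + 1) (by omega)]
    have hm : PySem.Int.mod k 2 = k % 2 := PySem.Int.mod_eq_emod_of_pos (by norm_num)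
    have hm1 : PySem.Int.mod (k + 1) 2 = (k + 1) % 2 := PySem.Int.mod_eq_emod_of_pos (by norm_num)
    by_cases hp : k % 2 = 0
    · have hp1 : (k + 1) % 2 = 1 := by omega
      rw [hm, hm1, hp, hp1]
      simp [pvH]
    · have hp0 : k % 2 = 1 := by omega
      have hp1 : (k + 1) % 2 = 0 := by omega
      rw [hm, hm1, hp0, hp1]
      simp [pvH]

-- how B's body steps over one leading chunk
theorem pvBodyL_slashslash (L : List (List Char)) (p : Nat) (e : Bool) :
    pvBodyL (['/', '/'] :: L) p e = pvBodyL L p e := by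
  simp [pvBodyL]

theorem pvBodyL_open_seq (L : List (List Char)) : pvBodyL (['/', '*'] :: L) 0 true = pvBodyL L 1 false := by
  simp [pvBodyL, pvH]
  congr 2
  rw [decide_eq_decide]
  omega

theorem pvBodyL_open_block (L : List (List Char)) : pvBodyL (['/', '*'] :: L) 1 false = false := by
  simp [pvBodyL, pvH]

theorem pvBodyL_close_seq (L : List (List Char)) : pvBodyL (['*', '/'] :: L) 0 true = false := by
  simp [pvBodyL, pvH]

theorem pvBodyL_close_block (L : List (List Char)) : pvBodyL (['*', '/'] :: L) 1 false = pvBodyL L 0 true := by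
  simp [pvBodyL, pvH]
  congr 2
  rw [decide_eq_decide]
  omega

theorem pvBodyL_bad (x : List Char) (L : List (List Char)) (p : Nat) (e : Bool)
    (hbad : ¬ (x = ['/', '/'] ∨ x = ['/', '*'] ∨ x = ['*', '/'])) : pvBodyL (x :: L) p e = false := by
  have h1 : ¬ x = ['/', '/'] := fun h => hbad (Or.inl h)
  have h2 : ¬ x = ['/', '*'] := fun h => hbad (Or.inr (Or.inl h))
  have h3 : ¬ x = ['*', '/'] := fun h => hbad (Or.inr (Or.inr h))
  simp [pvBodyL, h1, h2, h3]

-- the parser states compute exactly B's chunk/filter/alternation checks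
theorem pvParser_eq_body : ∀ (cs : List Char), cs.length % 2 = 0 →
    pvSeq cs = pvBodyL (pvChunks cs) 0 true ∧ pvBlock cs = pvBodyL (pvChunks cs) 1 false
  | [], _ => by
    rw [pvChunks_nil]
    constructor <;> simp [pvSeq, pvBlock, pvBodyL, pvH]
  | [a], h => by simp at h
  | a :: b :: rest, h => by
    have hrest : rest.length % 2 = 0 := by simp at h; omega
    have ih := pvParser_eq_body rest hrest
    rw [pvChunks_cons]
    by_cases h1 : a = '/' ∧ b = '/'
    · obtain ⟨ha, hb⟩ := h1; subst ha; subst hb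
      rw [pvBodyL_slashslash, pvBodyL_slashslash]
      exact ⟨by simpa [pvSeq] using ih.1, by simpa [pvBlock] using ih.2⟩
    · by_cases h2 : a = '/' ∧ b = '*'
      · obtain ⟨ha, hb⟩ := h2; subst ha; subst hb
        rw [pvBodyL_open_seq, pvBodyL_open_block]
        exact ⟨by simpa [pvSeq, h1] using ih.2, by simp [pvBlock]⟩
      · by_cases h3 : a = '*' ∧ b = '/'
        · obtain ⟨ha, hb⟩ := h3; subst ha; subst hb
          rw [pvBodyL_close_seq, pvBodyL_close_block]
          exact ⟨by simp [pvSeq], by simpa [pvBlock, h1, h2] using ih.1⟩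
        · have hbad : ¬ ([a, b] = ['/', '/'] ∨ [a, b] = ['/', '*'] ∨ [a, b] = ['*', '/']) := by
            simp_all
          rw [pvBodyL_bad _ _ _ _ hbad, pvBodyL_bad _ _ _ _ hbad]
          exact ⟨by simp [pvSeq, h1, h2], by simp [pvBlock, h1, h3]⟩

-- ===== VERDICT (by name: the statement is the Claim_ definition above) =====
theorem comments_correct_spec : Claim_equal_comments_correct := by
  intro s _
  unfold Spec_comments_correct comments_correct comments_correct_alt
  have hlen : PySem.Str.len s = (s.toList.length : Int) := PySem.Str.len_eq s
  simp only [hlen]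
  have hm : PySem.Int.mod (s.toList.length : Int) 2 = (s.toList.length : Int) % 2 :=
    PySem.Int.mod_eq_emod_of_pos (by norm_num)
  by_cases hg : (s.toList.length : Int) < 2 ∨ (s.toList.length : Int) % 2 ≠ 0
  · rw [if_pos (by rw [hm]; tauto), if_pos (by rw [hm]; tauto)]
  · push Not at hg
    obtain ⟨h2, heven⟩ := hg
    rw [if_neg (by rw [hm]; push Not; exact ⟨heven, h2⟩), if_neg (by rw [hm]; push Not; exact ⟨h2, heven⟩)]
    have heven' : s.toList.length % 2 = 0 := by omega
    rw [pvLoop_eq_parser s.toList heven' false]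
    simp only [Bool.false_eq_true, if_false]
    rw [(pvParser_eq_body s.toList heven').1]
    simp only [pvBodyL, pvChunks]
    rw [pvEnumAll _ 0 (by norm_num)]
    rfl
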